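-- pv_equiv track=rewrite | github.com/LynnaNeri/rPNESsupport | txt_reader.py | find_matching_tuples
-- ===== SOURCE A (Python) =====
-- def find_matching_tuples(list_1, list_2):
--     matches = []
--
--     for set_1, set_2 in zip(list_1, list_2):
--         matching_set = []
--
--         for sublist_1, sublist_2 in zip(set_1, set_2):
--             matching_tuples = []
--             matched_indices = set()
--
--             for tuple_1 in sublist_1:
--                 string_1 = tuple_1[0]
--
--                 for j, tuple_2 in enumerate(sublist_2):
--                     if j in matched_indices:
--                         continue
--
--                     string_2 = tuple_2[0]
--
--                     if string_1 == string_2: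
--                         matching_tuples.append(tuple_1)
--                         matched_indices.add(j)
--                         break
--
--             matching_set.append(matching_tuples)
--
--         matches.append(matching_set)
--
--     return matches
-- ===== SOURCE B (Python) =====
-- def _match_one(sublist_1, sublist_2):
--     # Count available first elements of sublist_2 once; consume counts on match.
--     cnt = {}
--     for t2 in sublist_2:
--         cnt[t2[0]] = cnt.get(t2[0], 0) + 1
--     out = []
--     for t1 in sublist_1:
--         c = cnt.get(t1[0], 0)
--         if c > 0:
--             out.append(t1)
--             cnt[t1[0]] = c - 1
--     return out
--
--
-- def find_matching_tuples(list_1, list_2):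
--     return [[_match_one(s1, s2) for s1, s2 in zip(set_1, set_2)]
--             for set_1, set_2 in zip(list_1, list_2)]
-- ===== Notes on version B (the rewrite author's own statement) =====
-- stated objective: alternative
-- what changed: Replaced A's per-tuple linear rescan of sublist_2 guarded by a matched-index set with a multiset counter of sublist_2's first elements built once and decremented on each match, a single pass over each list per sublist pair.
import Mathlib
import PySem

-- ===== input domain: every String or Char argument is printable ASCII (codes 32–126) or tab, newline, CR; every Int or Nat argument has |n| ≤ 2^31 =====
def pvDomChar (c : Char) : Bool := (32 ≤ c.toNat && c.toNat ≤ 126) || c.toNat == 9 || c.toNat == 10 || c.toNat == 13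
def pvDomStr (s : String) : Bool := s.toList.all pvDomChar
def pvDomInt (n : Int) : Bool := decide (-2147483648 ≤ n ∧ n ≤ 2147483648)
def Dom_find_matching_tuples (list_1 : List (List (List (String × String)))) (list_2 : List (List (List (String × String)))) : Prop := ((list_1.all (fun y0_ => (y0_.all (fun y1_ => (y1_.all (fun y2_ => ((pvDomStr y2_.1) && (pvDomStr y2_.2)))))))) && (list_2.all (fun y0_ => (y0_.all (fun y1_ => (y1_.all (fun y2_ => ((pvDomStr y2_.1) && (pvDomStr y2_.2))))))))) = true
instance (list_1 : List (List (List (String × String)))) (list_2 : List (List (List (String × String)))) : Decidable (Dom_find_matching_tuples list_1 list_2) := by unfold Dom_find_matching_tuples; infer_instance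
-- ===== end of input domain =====

-- B replaces A's per-tuple rescan of sublist_2 (with a matched-index set) by a counter of
-- sublist_2's first elements consumed on match: one pass over each list per sublist pair.

-- ===== PORT A =====
-- the inner 'for j, tuple_2 in enumerate(sublist_2): if j in matched_indices: continue; if eq: break'
def pvScanA (s : String) (mi : PySem.Set Nat) : List (String × String) → Nat → Option Nat
  | [], _ => none
  | t2 :: rest, j =>
    if PySem.Set.contains mi j then pvScanA s mi rest (j + 1)
    else if t2.1 == s then some j
    else pvScanA s mi rest (j + 1)

-- the 'for tuple_1 in sublist_1' loop: (matching_tuples, matched_indices) state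
def pvInnerA (sublist_1 sublist_2 : List (String × String)) : List (String × String) :=
  (sublist_1.foldl
    (fun (st : List (String × String) × PySem.Set Nat) t1 =>
      match pvScanA t1.1 st.2 sublist_2 0 with
      | some j => (st.1 ++ [t1], PySem.Set.add st.2 j)
      | none => st)
    ([], PySem.Set.empty)).1

def find_matching_tuples (list_1 : List (List (List (String × String)))) (list_2 : List (List (List (String × String)))) : List (List (List (String × String))) :=
  (list_1.zip list_2).foldl
    (fun acc p =>
      acc ++ [(p.1.zip p.2).foldl (fun ms q => ms ++ [pvInnerA q.1 q.2]) []])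
    []

-- ===== PORT B =====
-- _match_one: build the counter of first elements, then one pass over sublist_1
def pvInnerB (sublist_1 sublist_2 : List (String × String)) : List (String × String) :=
  let cnt := sublist_2.foldl
    (fun (d : PySem.Dict String Int) t2 => d.insert t2.1 (d.getD t2.1 0 + 1)) PySem.Dict.empty
  (sublist_1.foldl
    (fun (st : List (String × String) × PySem.Dict String Int) t1 =>
      let c := st.2.getD t1.1 0
      if 0 < c then (st.1 ++ [t1], st.2.insert t1.1 (c - 1)) else st)
    ([], cnt)).1

def find_matching_tuples_alt (list_1 : List (List (List (String × String)))) (list_2 : List (List (List (String × String)))) : List (List (List (String × String))) :=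
  (list_1.zip list_2).map (fun p => (p.1.zip p.2).map (fun q => pvInnerB q.1 q.2))

-- ===== PRECONDITION & SPEC =====
def Spec_find_matching_tuples (list_1 : List (List (List (String × String)))) (list_2 : List (List (List (String × String)))) (out : List (List (List (String × String)))) : Prop := out = find_matching_tuples_alt list_1 list_2
instance (list_1 : List (List (List (String × String)))) (list_2 : List (List (List (String × String)))) (out : List (List (List (String × String)))) : Decidable (Spec_find_matching_tuples list_1 list_2 out) := by unfold Spec_find_matching_tuples; infer_instance

-- ===== CLAIM (what is proved, stated in full; the proofs are below) =====
def Claim_equal_find_matching_tuples : Prop := ∀ (list_1 : List (List (List (String × String)))) (list_2 : List (List (List (String × String)))), Dom_find_matching_tuples list_1 list_2 → Spec_find_matching_tuples list_1 list_2 (find_matching_tuples list_1 list_2)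

-- ===== LEMMAS AND PROOFS =====

-- unmatched occurrences of first-element s in s2 at offsets ≥ j0, indices outside mi
def pvRem (mi : PySem.Set Nat) (s : String) : List (String × String) → Nat → Nat
  | [], _ => 0
  | t :: rest, j => (if j ∉ mi ∧ t.1 = s then 1 else 0) + pvRem mi s rest (j + 1)

lemma pvScanA_none_iff (s : String) (mi : PySem.Set Nat) (s2 : List (String × String)) :
    ∀ j0, pvScanA s mi s2 j0 = none ↔ pvRem mi s s2 j0 = 0 := by
  induction s2 with
  | nil => intro j0; simp [pvScanA, pvRem]
  | cons t rest ih =>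
    intro j0
    simp only [pvScanA, pvRem]
    by_cases hm : j0 ∈ mi
    · simp [hm, ih]
    · have hc : PySem.Set.contains mi j0 = false := by
        by_contra h
        exact hm ((PySem.Set.contains_iff mi j0).mp (by simpa using h))
      by_cases he : t.1 = s
      · simp [he, hm]
      · simp [he, hm, ih]

lemma pvScanA_ge (s : String) (mi : PySem.Set Nat) (s2 : List (String × String)) :
    ∀ j0 j, pvScanA s mi s2 j0 = some j → j0 ≤ j := by
  induction s2 with
  | nil => intro j0 j h; simp [pvScanA] at h
  | cons t rest ih =>
    intro j0 j h
    simp only [pvScanA] at h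
    split at h
    · exact Nat.le_of_succ_le (ih (j0 + 1) j h)
    · split at h
      · exact le_of_eq (Option.some.inj h)
      · exact Nat.le_of_succ_le (ih (j0 + 1) j h)

-- indices below the start are never looked at
lemma pvRem_add_lt (s' : String) (j : Nat) (mi : PySem.Set Nat)
    (s2 : List (String × String)) :
    ∀ j0, j < j0 → pvRem (PySem.Set.add mi j) s' s2 j0 = pvRem mi s' s2 j0 := by
  induction s2 with
  | nil => intro j0 _; rfl
  | cons t rest ih =>
    intro j0 hj
    simp only [pvRem]
    have : (j0 ∉ PySem.Set.add mi j) ↔ (j0 ∉ mi) := by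
      rw [Iff.comm, not_iff_not, PySem.Set.mem_add]
      constructor
      · exact Or.inl
      · rintro (h | h)
        · exact h
        · omega
    rw [ih (j0 + 1) (by omega)]
    by_cases hm : j0 ∉ mi
    · simp [hm, this.mpr hm]
    · rw [Decidable.not_not] at hm
      have : j0 ∈ PySem.Set.add mi j := (PySem.Set.mem_add ..).mpr (Or.inl hm)
      simp [hm, this]

lemma pvScanA_some_rem (s : String) (s2 : List (String × String)) :
    ∀ (mi : PySem.Set Nat) j0 j, pvScanA s mi s2 j0 = some j → ∀ s',
      pvRem (PySem.Set.add mi j) s' s2 j0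
        = pvRem mi s' s2 j0 - (if s' = s then 1 else 0) := by
  induction s2 with
  | nil => intro mi j0 j h; simp [pvScanA] at h
  | cons t rest ih =>
    intro mi j0 j h s'
    simp only [pvScanA] at h
    simp only [pvRem]
    by_cases hm : j0 ∈ mi
    · have hc : PySem.Set.contains mi j0 = true := (PySem.Set.contains_iff mi j0).mpr hm
      rw [hc] at h; simp only [if_true] at h
      have hma : j0 ∈ PySem.Set.add mi j := (PySem.Set.mem_add ..).mpr (Or.inl hm)
      simp only [hm, hma, not_true_eq_false, false_and, if_false, Nat.zero_add]
      exact ih mi (j0 + 1) j h s'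
    · have hc : PySem.Set.contains mi j0 = false := by
        by_contra hcc
        exact hm ((PySem.Set.contains_iff mi j0).mp (by simpa using hcc))
      rw [hc] at h; simp only [Bool.false_eq_true, if_false] at h
      by_cases he : t.1 = s
      · have hj : j = j0 := (Option.some.inj (by simpa [he] using h)).symm
        subst hj
        have hja : j ∈ PySem.Set.add mi j := (PySem.Set.mem_add ..).mpr (Or.inr rfl)
        rw [pvRem_add_lt s' j mi rest (j + 1) (by omega)]
        by_cases hs : s' = s
        · simp [hm, he, hs]
        · simp [hm, he, hs, Ne.symm hs]
      · have hne : (t.1 == s) = false := by simpa using he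
        rw [hne] at h; simp only [Bool.false_eq_true, if_false] at h
        have hge : j0 + 1 ≤ j := pvScanA_ge s mi rest (j0 + 1) j h
        have hnj : ¬ j0 = j := by omega
        have hiff : (j0 ∉ PySem.Set.add mi j) ↔ (j0 ∉ mi) := by
          rw [Iff.comm, not_iff_not, PySem.Set.mem_add]
          constructor
          · exact Or.inl
          · rintro (hh | hh)
            · exact hh
            · exact absurd hh hnj
        rw [ih mi (j0 + 1) j h s']
        by_cases hs : s' = s
        · subst hs
          simp [he, hm, hiff.mpr hm]
        · by_cases hm' : j0 ∉ mi
          · simp [hm', hiff.mpr hm', hs]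
          · rw [Decidable.not_not] at hm'
            have : j0 ∈ PySem.Set.add mi j := (PySem.Set.mem_add ..).mpr (Or.inl hm')
            simp [hm', this, hs]

lemma pvRem_empty (s : String) (s2 : List (String × String)) :
    ∀ j0, pvRem PySem.Set.empty s s2 j0 = (s2.map Prod.fst).count s := by
  induction s2 with
  | nil => intro j0; rfl
  | cons t rest ih =>
    intro j0
    simp only [pvRem, List.map_cons, List.count_cons, ih (j0 + 1)]
    have : (j0 ∉ (PySem.Set.empty : PySem.Set Nat)) := by simp [PySem.Set.empty]
    by_cases he : t.1 = s
    · simp [he]; omega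
    · simp [he]

-- the two inner loops agree when the counter matches the remaining-count abstraction
lemma pvLoop_eq (s2 : List (String × String)) :
    ∀ (s1 : List (String × String)) (acc : List (String × String))
      (mi : PySem.Set Nat) (d : PySem.Dict String Int),
      (∀ s, d.getD s 0 = (pvRem mi s s2 0 : Int)) →
      (s1.foldl
        (fun (st : List (String × String) × PySem.Set Nat) t1 =>
          match pvScanA t1.1 st.2 s2 0 with
          | some j => (st.1 ++ [t1], PySem.Set.add st.2 j)
          | none => st) (acc, mi)).1
      = (s1.foldl
          (fun (st : List (String × String) × PySem.Dict String Int) t1 =>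
            let c := st.2.getD t1.1 0
            if 0 < c then (st.1 ++ [t1], st.2.insert t1.1 (c - 1)) else st) (acc, d)).1 := by
  intro s1
  induction s1 with
  | nil => intro acc mi d _; rfl
  | cons t1 rest ih =>
    intro acc mi d hinv
    simp only [List.foldl_cons]
    cases hscan : pvScanA t1.1 mi s2 0 with
    | none =>
      have h0 : pvRem mi t1.1 s2 0 = 0 := (pvScanA_none_iff t1.1 mi s2 0).mp hscan
      have hc : d.getD t1.1 0 = 0 := by rw [hinv t1.1, h0]; rfl
      have : ¬ (0 < d.getD t1.1 0) := by rw [hc]; omega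
      simp only [hc]
      rw [ih acc mi d hinv]
      norm_num
    | some j =>
      have hpos : 0 < pvRem mi t1.1 s2 0 := by
        rcases Nat.eq_zero_or_pos (pvRem mi t1.1 s2 0) with h | h
        · exact absurd hscan (by rw [(pvScanA_none_iff t1.1 mi s2 0).mpr h]; simp)
        · exact h
      have hcpos : 0 < d.getD t1.1 0 := by rw [hinv t1.1]; exact_mod_cast hpos
      have hrem := pvScanA_some_rem t1.1 s2 mi 0 j hscan
      simp only [if_pos hcpos]
      refine ih (acc ++ [t1]) (PySem.Set.add mi j) (d.insert t1.1 (d.getD t1.1 0 - 1)) ?_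
      intro s
      rw [PySem.Dict.getD_insert, hrem s]
      by_cases hs : s = t1.1
      · rw [hs, hinv t1.1]
        have h1 : 1 ≤ pvRem mi t1.1 s2 0 := hpos
        simp [Nat.cast_sub h1]
      · simp only [if_neg hs]
        rw [hinv s]
        simp

lemma pvInner_eq (s1 s2 : List (String × String)) : pvInnerA s1 s2 = pvInnerB s1 s2 := by
  unfold pvInnerA pvInnerB
  refine pvLoop_eq s2 s1 [] PySem.Set.empty _ ?_
  intro s
  have hmap : List.foldl (fun (d : PySem.Dict String Int) t2 => d.insert t2.1 (d.getD t2.1 0 + 1))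
        PySem.Dict.empty s2
      = List.foldl (fun (d : PySem.Dict String Int) x => d.insert x (d.getD x 0 + 1))
        PySem.Dict.empty (s2.map Prod.fst) := by rw [List.foldl_map]
  rw [hmap, PySem.Dict.getD_foldl_insert_add_one, PySem.Dict.getD_empty, pvRem_empty]
  simp

-- ===== VERDICT (by name: the statement is the Claim_ definition above) =====
theorem find_matching_tuples_spec : Claim_equal_find_matching_tuples := by
  intro list_1 list_2 _
  unfold Spec_find_matching_tuples find_matching_tuples find_matching_tuples_alt
  rw [PySem.List.foldl_append_singleton_eq_map]
  refine List.map_congr_left ?_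
  intro p _
  rw [PySem.List.foldl_append_singleton_eq_map]
  exact List.map_congr_left (fun q _ => pvInner_eq q.1 q.2)
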